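-- pv_equiv track=rewrite | github.com/sOstrovsky/python_misis | hw2/task3.py | create_structured_data
-- ===== SOURCE A (Python) =====
-- def create_structured_data(raw):
--     res = {}
--     for k, v in raw:
--         if k in res:
--             res[k]['amount'] += 1
--             res[k]['total'] += v
--         else:
--             res[k] = {'amount': 1, 'total': v}
--     return res
-- ===== SOURCE B (Python) =====
-- def create_structured_data(raw):
--     # Phase 1: group all values per key, preserving key encounter order.
--     groups = {}
--     for k, v in raw:
--         groups.setdefault(k, []).append(v)
--     # Phase 2: aggregate each group in one comprehension.
--     return {k: {'amount': len(vs), 'total': sum(vs)} for k, vs in groups.items()}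
-- ===== Notes on version B (the rewrite author's own statement) =====
-- stated objective: alternative
-- what changed: B separates grouping from aggregation: one pass collects each key's values into a dict-of-lists, then a comprehension maps every group to its amount/total, instead of threading running counters through a membership branch.
import Mathlib
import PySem

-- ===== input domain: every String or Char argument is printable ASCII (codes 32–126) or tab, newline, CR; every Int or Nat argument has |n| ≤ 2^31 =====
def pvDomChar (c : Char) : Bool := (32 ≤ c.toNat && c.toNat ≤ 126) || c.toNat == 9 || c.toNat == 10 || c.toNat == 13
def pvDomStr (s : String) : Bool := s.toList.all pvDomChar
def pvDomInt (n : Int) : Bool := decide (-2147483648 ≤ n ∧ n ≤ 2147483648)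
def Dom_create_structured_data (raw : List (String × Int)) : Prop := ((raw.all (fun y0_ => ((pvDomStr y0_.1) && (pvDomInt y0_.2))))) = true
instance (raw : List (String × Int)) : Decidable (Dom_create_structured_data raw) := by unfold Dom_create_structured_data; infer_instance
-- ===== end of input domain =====

-- B groups all values per key first and aggregates in a second pass (alternative decomposition, same cost); proved equal to A on all inputs.

-- ===== PORT A =====
-- res[k]['amount'] += 1 and res[k]['total'] += v are each an outer modify of the inner dict;
-- the defaults (empty / 0) are unreachable because the branch is guarded by `contains`.
def create_structured_data (raw : List (String × Int)) : List (String × List (String × Int)) :=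
  let res := raw.foldl (fun res kv =>
    if res.contains kv.1 then
      (res.modify kv.1 PySem.Dict.empty (fun d => d.modify "amount" 0 (· + 1))).modify kv.1
        PySem.Dict.empty (fun d => d.modify "total" 0 (· + kv.2))
    else
      res.insert kv.1 (PySem.Dict.ofList [("amount", (1 : Int)), ("total", kv.2)]))
    (PySem.Dict.empty : PySem.Dict String (PySem.Dict String Int))
  res.items.map (fun p => (p.1, p.2.items))

-- ===== PORT B =====
-- groups.setdefault(k, []).append(v) has the effect of modify k [] (· ++ [v]) on the dict.
def create_structured_data_alt (raw : List (String × Int)) : List (String × List (String × Int)) :=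
  let groups := raw.foldl (fun g p => g.modify p.1 [] (fun vs => vs ++ [p.2]))
    (PySem.Dict.empty : PySem.Dict String (List Int))
  groups.items.map (fun p => (p.1, [("amount", (p.2.length : Int)), ("total", p.2.sum)]))

-- ===== PRECONDITION & SPEC =====
def Spec_create_structured_data (raw : List (String × Int)) (out : List (String × List (String × Int))) : Prop := out = create_structured_data_alt raw
instance (raw : List (String × Int)) (out : List (String × List (String × Int))) : Decidable (Spec_create_structured_data raw out) := by unfold Spec_create_structured_data; infer_instance

-- ===== CLAIM (what is proved, stated in full; the proofs are below) =====
def Claim_equal_create_structured_data : Prop := ∀ (raw : List (String × Int)), Dom_create_structured_data raw → Spec_create_structured_data raw (create_structured_data raw)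

-- ===== LEMMAS AND PROOFS =====

-- the inner dict A maintains for a key whose collected values are vs
def pvInner (vs : List Int) : PySem.Dict String Int :=
  PySem.Dict.mk [("amount", (vs.length : Int)), ("total", vs.sum)]

lemma pvInner_step (vs : List Int) (v : Int) :
    ((pvInner vs).modify "amount" 0 (· + 1)).modify "total" 0 (· + v) = pvInner (vs ++ [v]) := by
  simp [pvInner, PySem.Dict.modify, PySem.Dict.insert, PySem.Dict.getD, PySem.Dict.get?,
    PySem.Dict.contains]

lemma pv_keys_eq {d : PySem.Dict String (PySem.Dict String Int)} {g : PySem.Dict String (List Int)}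
    (h : d.items = g.items.map (fun p => (p.1, pvInner p.2))) : d.keys = g.keys := by
  simp [PySem.Dict.keys, h]

lemma pv_invariant (l : List (String × Int)) (d : PySem.Dict String (PySem.Dict String Int))
    (g : PySem.Dict String (List Int)) (hnd : g.keys.Nodup)
    (h : d.items = g.items.map (fun p => (p.1, pvInner p.2))) :
    (l.foldl (fun res kv =>
      if res.contains kv.1 then
        (res.modify kv.1 PySem.Dict.empty (fun dd => dd.modify "amount" 0 (· + 1))).modify kv.1
          PySem.Dict.empty (fun dd => dd.modify "total" 0 (· + kv.2))
      else
        res.insert kv.1 (PySem.Dict.ofList [("amount", (1 : Int)), ("total", kv.2)])) d).items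
    = ((l.foldl (fun g p => g.modify p.1 [] (fun vs => vs ++ [p.2])) g).items).map
        (fun p => (p.1, pvInner p.2)) := by
  induction l generalizing d g with
  | nil => simpa using h
  | cons p l ih =>
    obtain ⟨k, v⟩ := p
    simp only [List.foldl_cons]
    have hkeys : d.keys = g.keys := pv_keys_eq h
    have hdnd : d.keys.Nodup := hkeys ▸ hnd
    have hc : d.contains k = g.contains k := by
      rw [PySem.Dict.contains_eq_decide_mem_keys, PySem.Dict.contains_eq_decide_mem_keys, hkeys]
    by_cases hg : g.contains k = true
    · -- k already present: both sides update the existing entry in place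
      have hdc : d.contains k = true := hc.trans hg
      obtain ⟨vs, hvs⟩ : ∃ vs, (k, vs) ∈ g.items := by
        have hk : k ∈ g.keys := (PySem.Dict.contains_iff_mem_keys g k).mp hg
        simp only [PySem.Dict.keys, List.mem_map] at hk
        obtain ⟨q, hq, hq1⟩ := hk
        exact ⟨q.2, by rwa [show (k, q.2) = q from by rw [← hq1]]⟩
      have hgD : g.getD k [] = vs := PySem.Dict.getD_of_mem_items g hvs hnd []
      have hdm : (k, pvInner vs) ∈ d.items := by
        rw [h]; exact List.mem_map.mpr ⟨(k, vs), hvs, rfl⟩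
      have hdD : d.getD k PySem.Dict.empty = pvInner vs :=
        PySem.Dict.getD_of_mem_items d hdm hdnd _
      have e1 : d.modify k PySem.Dict.empty (fun dd => dd.modify "amount" 0 (· + 1))
          = d.insert k ((d.getD k PySem.Dict.empty).modify "amount" 0 (· + 1)) := rfl
      have hd1c : (d.insert k ((d.getD k PySem.Dict.empty).modify "amount" 0 (· + 1))).contains k = true :=
        PySem.Dict.contains_insert_self _ _ _
      have e2 : (d.insert k ((d.getD k PySem.Dict.empty).modify "amount" 0 (· + 1))).modify k
            PySem.Dict.empty (fun dd => dd.modify "total" 0 (· + v))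
          = (d.insert k ((d.getD k PySem.Dict.empty).modify "amount" 0 (· + 1))).insert k
            (((d.insert k ((d.getD k PySem.Dict.empty).modify "amount" 0 (· + 1))).getD k
              PySem.Dict.empty).modify "total" 0 (· + v)) := rfl
      have eB : g.modify k [] (fun vsx => vsx ++ [v]) = g.insert k (vs ++ [v]) := by
        show g.insert k (g.getD k [] ++ [v]) = _
        rw [hgD]
      have hnd' : (g.insert k (vs ++ [v])).keys.Nodup := PySem.Dict.nodup_keys_insert _ _ _ hnd
      have h' : ((d.insert k ((d.getD k PySem.Dict.empty).modify "amount" 0 (· + 1))).insert k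
            (((d.insert k ((d.getD k PySem.Dict.empty).modify "amount" 0 (· + 1))).getD k
              PySem.Dict.empty).modify "total" 0 (· + v))).items
          = (g.insert k (vs ++ [v])).items.map (fun p => (p.1, pvInner p.2)) := by
        rw [PySem.Dict.items_insert_of_contains _ _ hd1c,
            PySem.Dict.items_insert_of_contains _ _ hdc,
            PySem.Dict.items_insert_of_contains _ _ hg,
            PySem.Dict.getD_insert_self, hdD, pvInner_step, h,
            List.map_map, List.map_map, List.map_map]
        refine List.map_congr_left (fun q _ => ?_)
        by_cases hq : q.1 = k <;> simp [hq]
      simpa only [hdc, if_true, e1, e2, eB] using ih _ _ hnd' h'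
    · -- fresh key: both sides append a new entry
      have hgf : g.contains k = false := by simpa using hg
      have hdc : d.contains k = false := by rw [hc]; exact hgf
      have eB : g.modify k [] (fun vsx => vsx ++ [v]) = g.insert k ([v]) := by
        show g.insert k (g.getD k [] ++ [v]) = _
        rw [PySem.Dict.getD_of_not_contains g [] hgf]
        rfl
      have hnd' : (g.insert k [v]).keys.Nodup := PySem.Dict.nodup_keys_insert _ _ _ hnd
      have h' : (d.insert k (PySem.Dict.ofList [("amount", (1 : Int)), ("total", v)])).items
          = (g.insert k [v]).items.map (fun p => (p.1, pvInner p.2)) := by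
        rw [PySem.Dict.items_insert_of_not_contains _ _ hdc,
            PySem.Dict.items_insert_of_not_contains _ _ hgf, h, List.map_append]
        simp [pvInner, PySem.Dict.ofList, PySem.Dict.update, PySem.Dict.insert,
          PySem.Dict.contains, PySem.Dict.empty]
      simpa only [hdc, if_false, Bool.false_eq_true, eB] using ih _ _ hnd' h'

-- ===== VERDICT (by name: the statement is the Claim_ definition above) =====
theorem create_structured_data_spec : Claim_equal_create_structured_data := by
  intro raw _
  unfold Spec_create_structured_data create_structured_data create_structured_data_alt
  have h := pv_invariant raw PySem.Dict.empty PySem.Dict.empty (by decide) (by decide)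
  simp only [h, List.map_map]
  rfl
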